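-- pv_equiv track=rewrite | github.com/pypi-data/pypi-mirror-389 | packages/mongo-sql-parser/mongo_sql_parser-0.1.0.tar.gz/mongo_sql_parser-0.1.0/mongo_sql_parser/mongo_shell_parser.py | _normalize_single_quoted_strings
-- ===== SOURCE A (Python) =====
-- from typing import Any, Dict, List, Optional, Tuple, Union
--
-- def _normalize_single_quoted_strings(s: str) -> str:
--     out: List[str] = []
--     i = 0
--     in_squote = False
--     in_dquote = False
--     while i < len(s):
--         ch = s[i]
--         if not in_dquote and ch == "'":
--             esc = 0
--             j = i - 1
--             while j >= 0 and s[j] == "\\":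
--                 esc += 1
--                 j -= 1
--             if esc % 2 == 0:
--                 in_squote = not in_squote
--                 out.append('"')
--             else:
--                 out.append(ch)
--         elif not in_squote and ch == '"':
--             esc = 0
--             j = i - 1
--             while j >= 0 and s[j] == "\\":
--                 esc += 1
--                 j -= 1
--             if esc % 2 == 0:
--                 in_dquote = not in_dquote
--             out.append(ch)
--         else:
--             if in_squote and ch == '"':
--                 out.append('\\"')
--             else:
--                 out.append(ch)
--         i += 1
--     return "".join(out)
-- ===== SOURCE B (Python) =====
-- def _normalize_single_quoted_strings(s: str) -> str:
--     # One pass: track the length of the current run of backslashes incrementally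
--     # instead of rescanning backwards at every quote.
--     out = []
--     bs = 0  # number of consecutive backslashes immediately before current char
--     in_squote = False
--     in_dquote = False
--     for ch in s:
--         if not in_dquote and ch == "'":
--             if bs % 2 == 0:
--                 in_squote = not in_squote
--                 out.append('"')
--             else:
--                 out.append(ch)
--         elif not in_squote and ch == '"':
--             if bs % 2 == 0:
--                 in_dquote = not in_dquote
--             out.append(ch)
--         elif in_squote and ch == '"':
--             out.append('\\"')
--         else:
--             out.append(ch)
--         bs = bs + 1 if ch == "\\" else 0
--     return "".join(out)
-- ===== Notes on version B (the rewrite author's own statement) =====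
-- stated objective: faster
-- what changed: B replaces A's backward rescan of preceding backslashes at every quote with an incrementally maintained run-length counter, turning the O(n^2) worst case into a single O(n) pass.
import Mathlib
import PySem

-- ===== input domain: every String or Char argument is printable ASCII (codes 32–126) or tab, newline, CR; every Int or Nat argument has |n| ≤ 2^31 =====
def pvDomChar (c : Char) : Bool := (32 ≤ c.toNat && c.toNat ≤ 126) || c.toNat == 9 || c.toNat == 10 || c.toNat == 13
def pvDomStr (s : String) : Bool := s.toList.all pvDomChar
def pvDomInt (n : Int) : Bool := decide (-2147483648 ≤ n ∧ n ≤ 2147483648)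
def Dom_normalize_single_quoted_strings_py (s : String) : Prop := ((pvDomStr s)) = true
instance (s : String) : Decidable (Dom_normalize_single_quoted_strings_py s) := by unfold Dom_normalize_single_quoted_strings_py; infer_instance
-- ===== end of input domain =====

-- B replaces A's backward rescan of preceding backslashes at every quote with an
-- incrementally maintained run-length counter (single pass; equal output proved below).

-- ===== PORT A =====
-- the inner `while j >= 0 and s[j] == '\\'` backward scan: escN l i counts the
-- consecutive backslashes in l at positions i-1, i-2, …
def escN (l : List Char) : Nat → Nat
  | 0 => 0
  | i+1 => if l.getD i ' ' = '\\' then escN l i + 1 else 0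

-- the `while i < len(s)` loop: rest is the suffix s[i:], ch = s[i]
def goA (l : List Char) : List Char → Nat → Bool → Bool → List Char → List Char
  | [], _, _, _, out => out
  | ch :: rest, i, insq, indq, out =>
    if !indq && ch = '\'' then
      if escN l i % 2 = 0 then goA l rest (i+1) (!insq) indq (out ++ ['"'])
      else goA l rest (i+1) insq indq (out ++ [ch])
    else if !insq && ch = '"' then
      if escN l i % 2 = 0 then goA l rest (i+1) insq (!indq) (out ++ [ch])
      else goA l rest (i+1) insq indq (out ++ [ch])
    else
      if insq && ch = '"' then goA l rest (i+1) insq indq (out ++ ['\\', '"'])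
      else goA l rest (i+1) insq indq (out ++ [ch])

def normalize_single_quoted_strings_py (s : String) : String :=
  String.ofList (goA s.toList s.toList 0 false false [])

-- ===== PORT B =====
-- state: (bs = current backslash-run length, in_squote, in_dquote, out)
def stepB (st : Nat × Bool × Bool × List Char) (ch : Char) : Nat × Bool × Bool × List Char :=
  let bs := st.1
  let insq := st.2.1
  let indq := st.2.2.1
  let out := st.2.2.2
  let next : Bool × Bool × List Char :=
    if !indq && ch = '\'' then
      if bs % 2 = 0 then (!insq, indq, out ++ ['"']) else (insq, indq, out ++ [ch])
    else if !insq && ch = '"' then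
      (insq, (if bs % 2 = 0 then !indq else indq), out ++ [ch])
    else if insq && ch = '"' then (insq, indq, out ++ ['\\', '"'])
    else (insq, indq, out ++ [ch])
  ((if ch = '\\' then bs + 1 else 0), next)

def normalize_single_quoted_strings_py_alt (s : String) : String :=
  String.ofList (s.toList.foldl stepB (0, false, false, [])).2.2.2

-- ===== PRECONDITION & SPEC =====
def Spec_normalize_single_quoted_strings_py (s : String) (out : String) : Prop := out = normalize_single_quoted_strings_py_alt s
instance (s : String) (out : String) : Decidable (Spec_normalize_single_quoted_strings_py s out) := by unfold Spec_normalize_single_quoted_strings_py; infer_instance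

-- ===== CLAIM (what is proved, stated in full; the proofs are below) =====
def Claim_equal_normalize_single_quoted_strings_py : Prop := ∀ (s : String), Dom_normalize_single_quoted_strings_py s → Spec_normalize_single_quoted_strings_py s (normalize_single_quoted_strings_py s)

-- ===== LEMMAS AND PROOFS =====

-- A's backward scan at position i+1 is the incremental update B performs.
lemma escN_succ (l : List Char) (i : Nat) (h : i < l.length) :
    escN l (i+1) = if l[i] = '\\' then escN l i + 1 else 0 := by
  simp [escN, List.getD, List.getElem?_eq_getElem h]

-- loop correspondence: A's while-loop over the suffix s[i:] equals B's fold over it,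
-- provided bs carries the backslash count A would recompute.
lemma goA_eq_fold (l : List Char) : ∀ (rest : List Char) (i : Nat), l.drop i = rest →
    ∀ (insq indq : Bool) (out : List Char),
    goA l rest i insq indq out =
      (rest.foldl stepB (escN l i, insq, indq, out)).2.2.2 := by
  intro rest
  induction rest with
  | nil => intro i _ insq indq out; simp [goA]
  | cons ch rest ih =>
    intro i hdrop insq indq out
    have h : i < l.length := by
      by_contra hle
      rw [List.drop_eq_nil_of_le (by omega)] at hdrop
      exact absurd hdrop (by simp)
    have hch : l[i] = ch := by
      rw [List.drop_eq_getElem_cons h] at hdrop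
      exact (List.cons.injEq _ _ _ _ ▸ hdrop).1
    have hrest : l.drop (i+1) = rest := by
      rw [List.drop_eq_getElem_cons h] at hdrop
      exact (List.cons.injEq _ _ _ _ ▸ hdrop).2
    rw [goA]
    simp only [List.foldl_cons]
    by_cases h1 : (!indq && ch = '\'') = true
    · obtain ⟨hq1, hc1⟩ := Bool.and_eq_true_iff.mp h1
      have hq1' : indq = false := by simpa using hq1
      have hc1' : ch = '\'' := of_decide_eq_true hc1
      have hne : ¬ l[i] = '\\' := by simp [hch, hc1']
      have hesc : escN l (i+1) = 0 := by rw [escN_succ l i h]; simp [hne]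
      by_cases h2 : escN l i % 2 = 0
      · rw [if_pos h1, if_pos h2, ih (i+1) hrest]
        simp [stepB, hq1', hc1', h2, hesc]
      · rw [if_pos h1, if_neg h2, ih (i+1) hrest]
        simp [stepB, hq1', hc1', h2, hesc]
    · by_cases h2 : (!insq && ch = '"') = true
      · obtain ⟨hq2, hc2⟩ := Bool.and_eq_true_iff.mp h2
        have hq2' : insq = false := by simpa using hq2
        have hc2' : ch = '"' := of_decide_eq_true hc2
        have hne : ¬ l[i] = '\\' := by simp [hch, hc2']
        have hesc : escN l (i+1) = 0 := by rw [escN_succ l i h]; simp [hne]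
        by_cases h3 : escN l i % 2 = 0
        · rw [if_neg h1, if_pos h2, if_pos h3, ih (i+1) hrest]
          simp [stepB, h1, hq2', hc2', h3, hesc]
        · rw [if_neg h1, if_pos h2, if_neg h3, ih (i+1) hrest]
          simp [stepB, h1, hq2', hc2', h3, hesc]
      · by_cases h3 : (insq && ch = '"') = true
        · obtain ⟨hq3, hc3⟩ := Bool.and_eq_true_iff.mp h3
          have hq3' : insq = true := hq3
          have hc3' : ch = '"' := of_decide_eq_true hc3
          have hne : ¬ l[i] = '\\' := by simp [hch, hc3']
          have hesc : escN l (i+1) = 0 := by rw [escN_succ l i h]; simp [hne]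
          rw [if_neg h1, if_neg h2, if_pos h3, ih (i+1) hrest]
          simp [stepB, h1, h2, hq3', hc3', hesc]
        · rw [if_neg h1, if_neg h2, if_neg h3, ih (i+1) hrest]
          by_cases hne : ch = '\\'
          · have hesc : escN l (i+1) = escN l i + 1 := by
              rw [escN_succ l i h]; simp [hch, hne]
            simp [stepB, h1, h2, h3, hne, hesc]
          · have hesc : escN l (i+1) = 0 := by
              rw [escN_succ l i h]; simp [hch, hne]
            simp [stepB, h1, h2, h3, hne, hesc]

-- ===== VERDICT (by name: the statement is the Claim_ definition above) =====
theorem normalize_single_quoted_strings_py_spec : Claim_equal_normalize_single_quoted_strings_py := by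
  intro s _
  unfold Spec_normalize_single_quoted_strings_py normalize_single_quoted_strings_py normalize_single_quoted_strings_py_alt
  rw [goA_eq_fold s.toList s.toList 0 (by simp)]
  simp [escN]
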